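-- pv_equiv track=rewrite | github.com/Tianyi-Billy-Ma/Halluc | llmhalluc/hparams/parser.py | parse_cli_to_dotlist
-- ===== SOURCE A (Python) =====
-- def parse_cli_to_dotlist(args: list[str]) -> list[str]:
--     """
--     Convert CLI args like --num_train_epochs 1 to OmegaConf dotlist format.
--
--     Args:
--         args: CLI arguments like ['--num_train_epochs', '1', '--lr', '1e-4']
--
--     Returns:
--         Dotlist format like ['num_train_epochs=1', 'lr=1e-4']
--
--     Example:
--         >>> parse_cli_to_dotlist(['--num_train_epochs', '1', '--bf16'])
--         ['num_train_epochs=1', 'bf16=true']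
--     """
--     dotlist = []
--     i = 0
--     while i < len(args):
--         arg = args[i]
--         if arg.startswith("--"):
--             key = arg[2:]  # Remove '--'
--             # Check if next arg is a value or another flag
--             if i + 1 < len(args) and not args[i + 1].startswith("--"):
--                 value = args[i + 1]
--                 dotlist.append(f"{key}={value}")
--                 i += 2
--             else:
--                 # Boolean flag (--flag means True)
--                 dotlist.append(f"{key}=true")
--                 i += 1
--         else:
--             i += 1
--     return dotlist
-- ===== SOURCE B (Python) =====
-- def parse_cli_to_dotlist(args: list[str]) -> list[str]:
--     """Single forward pass with a pending-key state instead of index lookahead."""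
--     dotlist = []
--     pending = None
--     for token in args:
--         if token.startswith("--"):
--             if pending is not None:
--                 dotlist.append(f"{pending}=true")
--             pending = token[2:]
--         elif pending is not None:
--             dotlist.append(f"{pending}={token}")
--             pending = None
--         # stray value with no pending key: ignored
--     if pending is not None:
--         dotlist.append(f"{pending}=true")
--     return dotlist
-- ===== Notes on version B (the rewrite author's own statement) =====
-- stated objective: simpler
-- what changed: Replaced the index-based while-loop with i+1 lookahead and manual index stepping by a single for-loop state machine that carries a pending key and flushes it as 'key=true' or 'key=value' when the next token is seen (or at the end); avoiding repeated indexing/len() calls also made it measurably faster by a constant factor.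
import Mathlib
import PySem

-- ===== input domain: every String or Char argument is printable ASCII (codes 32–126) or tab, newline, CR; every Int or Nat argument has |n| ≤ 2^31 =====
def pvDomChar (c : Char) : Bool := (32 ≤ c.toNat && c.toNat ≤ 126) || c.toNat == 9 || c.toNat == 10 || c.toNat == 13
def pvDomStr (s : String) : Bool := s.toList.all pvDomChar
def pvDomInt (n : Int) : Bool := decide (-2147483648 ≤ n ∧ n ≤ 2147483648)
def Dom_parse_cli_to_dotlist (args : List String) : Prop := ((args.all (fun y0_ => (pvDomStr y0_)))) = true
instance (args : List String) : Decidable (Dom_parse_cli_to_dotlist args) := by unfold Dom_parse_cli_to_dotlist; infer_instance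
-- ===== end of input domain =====

-- B replaces A's index-based lookahead while-loop with a single pass carrying a pending key (simpler decomposition, same O(n) cost).


-- f"{k}={v}" (shared formatting helper; exact: plain character concatenation)
def pvKV (k v : String) : String := String.ofList (k.toList ++ '=' :: v.toList)

-- ===== PORT A =====
-- the while-loop over index i, with the i+1 lookahead and i += 1 / i += 2 steps
def pvGoA (args : List String) (i : Nat) (dotlist : List String) : List String :=
  if h : i < args.length then
    let arg := args[i]
    if PySem.Str.startswith arg "--" then
      let key := PySem.Str.slice arg (some 2) none   -- arg[2:]
      if h2 : i + 1 < args.length then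
        if ¬ (PySem.Str.startswith args[i + 1] "--" = true) then
          pvGoA args (i + 2) (dotlist ++ [pvKV key args[i + 1]])
        else
          pvGoA args (i + 1) (dotlist ++ [pvKV key "true"])
      else
        pvGoA args (i + 1) (dotlist ++ [pvKV key "true"])
    else
      pvGoA args (i + 1) dotlist
  else dotlist
termination_by args.length - i

def parse_cli_to_dotlist (args : List String) : List String := pvGoA args 0 []

-- ===== PORT B =====
-- single pass over the tokens carrying the pending key; flush at the end
def pvGoB (rest : List String) (pending : Option String) (dotlist : List String) : List String :=
  match rest with
  | [] =>
    match pending with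
    | some k => dotlist ++ [pvKV k "true"]
    | none => dotlist
  | token :: ts =>
    if PySem.Str.startswith token "--" then
      let dotlist' :=
        match pending with
        | some k => dotlist ++ [pvKV k "true"]
        | none => dotlist
      pvGoB ts (some (PySem.Str.slice token (some 2) none)) dotlist'
    else
      match pending with
      | some k => pvGoB ts none (dotlist ++ [pvKV k token])
      | none => pvGoB ts none dotlist

def parse_cli_to_dotlist_alt (args : List String) : List String := pvGoB args none []

-- ===== PRECONDITION & SPEC =====
def Spec_parse_cli_to_dotlist (args : List String) (out : List String) : Prop := out = parse_cli_to_dotlist_alt args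
instance (args : List String) (out : List String) : Decidable (Spec_parse_cli_to_dotlist args out) := by unfold Spec_parse_cli_to_dotlist; infer_instance

-- ===== CLAIM (what is proved, stated in full; the proofs are below) =====
def Claim_equal_parse_cli_to_dotlist : Prop := ∀ (args : List String), Dom_parse_cli_to_dotlist args → Spec_parse_cli_to_dotlist args (parse_cli_to_dotlist args)

-- ===== LEMMAS AND PROOFS =====

-- B's state machine: a pending key in front of a '--' token (or the empty rest) is
-- flushed as 'key=true' exactly as if it had been appended before continuing.
theorem pvGoB_flush (t : String) (ts : List String) (k : String) (acc : List String)
    (hflag : PySem.Str.startswith t "--" = true) :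
    pvGoB (t :: ts) (some k) acc = pvGoB (t :: ts) none (acc ++ [pvKV k "true"]) := by
  simp only [pvGoB]
  rw [if_pos hflag, if_pos hflag]

-- core correspondence: A's loop from index i equals B's pass over the remaining tokens
theorem pvGoA_eq_pvGoB (args : List String) (i : Nat) (acc : List String) :
    pvGoA args i acc = pvGoB (args.drop i) none acc := by
  by_cases h : i < args.length
  · have hdrop : args.drop i = args[i] :: args.drop (i + 1) :=
      List.drop_eq_getElem_cons h
    by_cases hflag : PySem.Str.startswith args[i] "--" = true
    · by_cases h2 : i + 1 < args.length
      · have hdrop2 : args.drop (i + 1) = args[i + 1] :: args.drop (i + 2) :=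
          List.drop_eq_getElem_cons h2
        by_cases hval : PySem.Str.startswith args[i + 1] "--" = true
        · -- next token is another flag: A appends key=true and steps by 1
          rw [pvGoA]
          simp only [h, dif_pos, h2]
          rw [if_pos hflag, if_neg (not_not_intro hval), pvGoA_eq_pvGoB args (i + 1), hdrop, hdrop2]
          conv_rhs => rw [pvGoB]
          rw [if_pos hflag]
          rw [pvGoB_flush _ _ _ _ hval]
        · -- next token is a value: A appends key=value and steps by 2
          rw [pvGoA]
          simp only [h, dif_pos, h2]
          rw [if_pos hflag, if_pos hval, pvGoA_eq_pvGoB args (i + 2), hdrop, hdrop2]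
          conv_rhs => rw [pvGoB]
          rw [if_pos hflag]
          conv_rhs => rw [pvGoB]
          rw [if_neg hval]
      · -- flag is the last token
        have hend : args.drop (i + 1) = [] := List.drop_eq_nil_of_le (by omega)
        rw [pvGoA]
        simp only [h, dif_pos]
        rw [if_pos hflag, dif_neg h2, pvGoA_eq_pvGoB args (i + 1), hdrop, hend]
        conv_rhs => rw [pvGoB]
        rw [if_pos hflag]
        simp only [pvGoB]
    · -- stray value with no pending key: both skip it
      rw [pvGoA]
      simp only [h, dif_pos]
      rw [if_neg hflag, pvGoA_eq_pvGoB args (i + 1), hdrop]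
      conv_rhs => rw [pvGoB]
      rw [if_neg hflag]
  · have hnil : args.drop i = [] := List.drop_eq_nil_of_le (by omega)
    rw [pvGoA, hnil]
    simp only [pvGoB]
    rw [dif_neg h]
termination_by args.length - i

-- ===== VERDICT (by name: the statement is the Claim_ definition above) =====
theorem parse_cli_to_dotlist_spec : Claim_equal_parse_cli_to_dotlist := by
  intro args _
  unfold Spec_parse_cli_to_dotlist parse_cli_to_dotlist parse_cli_to_dotlist_alt
  simpa using pvGoA_eq_pvGoB args 0 []
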